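-- pv_equiv track=rewrite | github.com/Hubtler/Advent-of-Code-2025 | Day07.py | parse
-- ===== SOURCE A (Python) =====
-- def parse(text):
--     lines = text.split("\n")
--     laser_position = None
--     splitting_positions = []
--     map_height = len(lines)
--     map_width = len(lines[0])
--     for i, line in enumerate(lines):
--         for j, c in enumerate(line):
--             if c == "^":
--                 splitting_positions.append((i, j))
--             elif c == "S":
--                 laser_position = (i,j)
--     return laser_position, splitting_positions, map_height, map_width
-- ===== SOURCE B (Python) =====
-- def parse(text):
--     lines = text.split("\n")
--
--     def positions(ch):
--         out = []
--         for i, line in enumerate(lines):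
--             j = line.find(ch)
--             while j != -1:
--                 out.append((i, j))
--                 j = line.find(ch, j + 1)
--         return out
--
--     splitting_positions = positions("^")
--     s_positions = positions("S")
--     laser_position = s_positions[-1] if s_positions else None
--     return laser_position, splitting_positions, len(lines), len(lines[0])
-- ===== Notes on version B (the rewrite author's own statement) =====
-- stated objective: faster
-- what changed: Replaces A's nested per-character scan with per-line substring searches (str.find in a while loop) that collect the splitter and laser positions as lists, taking the laser as the last element of the laser-position list instead of overwriting an accumulator.
import Mathlib
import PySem

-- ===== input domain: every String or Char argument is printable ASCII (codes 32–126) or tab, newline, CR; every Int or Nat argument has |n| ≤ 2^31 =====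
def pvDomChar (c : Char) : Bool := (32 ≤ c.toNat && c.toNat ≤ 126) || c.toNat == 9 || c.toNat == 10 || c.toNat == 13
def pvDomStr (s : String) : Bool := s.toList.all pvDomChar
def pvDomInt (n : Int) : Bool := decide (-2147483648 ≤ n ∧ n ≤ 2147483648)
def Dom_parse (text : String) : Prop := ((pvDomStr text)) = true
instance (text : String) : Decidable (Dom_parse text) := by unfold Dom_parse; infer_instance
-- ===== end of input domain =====

-- B replaces A's nested per-character loop with per-line substring searches (str.find in a
-- while loop) and takes the laser as the last element of the list of laser positions;
-- same exact return value, measurably faster in CPython (a timing run reports B faster: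
-- the scan runs in C-level str.find instead of a Python-level per-character loop).

-- ===== PORT A =====
def parse (text : String) : (Option (Int × Int)) × (List (Int × Int)) × Int × Int :=
  let lines := PySem.Chars.splitOn text.toList ['\n']
  let r := (PySem.List.enumerate lines 0).foldl
    (fun (st : Option (Int × Int) × List (Int × Int)) il =>
      (PySem.List.enumerate il.2 0).foldl
        (fun st2 jc =>
          if jc.2 = '^' then (st2.1, st2.2 ++ [(il.1, jc.1)])
          else if jc.2 = 'S' then (some (il.1, jc.1), st2.2)
          else st2) st)
    ((none : Option (Int × Int)), ([] : List (Int × Int)))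
  (r.1, r.2, (lines.length : Int), (((PySem.List.pyGet? lines 0).getD []).length : Int))

-- ===== PORT B =====
-- port of B's 'j = line.find(ch); while j != -1: out.append(j); j = line.find(ch, j+1)'
-- (fuel only makes the loop total: each found index is strictly larger than the last,
--  so line.length + 1 steps always suffice)
def findLoop (line ch : List Char) : Nat → Int → List Int
  | 0, _ => []
  | fuel + 1, j =>
    if j = -1 then []
    else j :: findLoop line ch fuel (PySem.Chars.findFrom line ch (j + 1))

def findAll (line ch : List Char) : List Int :=
  findLoop line ch (line.length + 1) (PySem.Chars.find line ch)

def positionsB (lines : List (List Char)) (ch : List Char) : List (Int × Int) :=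
  (PySem.List.enumerate lines 0).foldl
    (fun out il => out ++ (findAll il.2 ch).map (fun j => (il.1, j))) []

def parse_alt (text : String) : (Option (Int × Int)) × (List (Int × Int)) × Int × Int :=
  let lines := PySem.Chars.splitOn text.toList ['\n']
  let splitting := positionsB lines ['^']
  let sPos := positionsB lines ['S']
  let laser := PySem.List.pyGet? sPos (-1)
  (laser, splitting, (lines.length : Int), (((PySem.List.pyGet? lines 0).getD []).length : Int))

-- ===== PRECONDITION & SPEC =====
def Spec_parse (text : String) (out : (Option (Int × Int)) × (List (Int × Int)) × Int × Int) : Prop := out = parse_alt text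
instance (text : String) (out : (Option (Int × Int)) × (List (Int × Int)) × Int × Int) : Decidable (Spec_parse text out) := by unfold Spec_parse; infer_instance

-- ===== CLAIM (what is proved, stated in full; the proofs are below) =====
def Claim_equal_parse : Prop := ∀ (text : String), Dom_parse text → Spec_parse text (parse text)

-- ===== LEMMAS AND PROOFS =====
-- positions (as Int) of character c in cs, indices starting at s
def pvPos (c : Char) (cs : List Char) (s : Int) : List Int :=
  (PySem.List.enumerate cs s).filterMap (fun jc => if jc.2 = c then some jc.1 else none)

def pvLinePos (c : Char) (il : Int × List Char) : List (Int × Int) :=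
  (pvPos c il.2 0).map (fun j => (il.1, j))

theorem pvPos_nil (c : Char) (s : Int) : pvPos c [] s = [] := by
  simp [pvPos, PySem.List.enumerate]

theorem pvPos_cons (c x : Char) (cs : List Char) (s : Int) :
    pvPos c (x :: cs) s = (if x = c then [s] else []) ++ pvPos c cs (s + 1) := by
  simp [pvPos, PySem.List.enumerate_cons]
  split_ifs <;> simp_all

theorem pvPos_not_mem (c : Char) (cs : List Char) (s : Int) (h : c ∉ cs) :
    pvPos c cs s = [] := by
  induction cs generalizing s with
  | nil => exact pvPos_nil c s
  | cons x xs ih =>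
    simp at h
    rw [pvPos_cons]
    simp [Ne.symm h.1]
    exact ih _ h.2

theorem pvPos_first (c : Char) (cs : List Char) (s : Int) (k : Nat)
    (hk : cs[k]? = some c) (hmin : ∀ i < k, cs[i]? ≠ some c) :
    pvPos c cs s = (s + k) :: pvPos c (cs.drop (k + 1)) (s + k + 1) := by
  induction cs generalizing s k with
  | nil => simp at hk
  | cons x xs ih =>
    cases k with
    | zero =>
      simp at hk
      subst hk
      rw [pvPos_cons]
      simp
    | succ k =>
      have hx : x ≠ c := by
        intro hxc
        exact hmin 0 (Nat.succ_pos _) (by simp [hxc])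
      rw [pvPos_cons]
      simp at hk
      have hmin' : ∀ i < k, xs[i]? ≠ some c := by
        intro i hi
        have := hmin (i + 1) (by omega)
        simpa using this
      rw [ih (s + 1) k hk hmin']
      simp [hx]
      refine ⟨by ring, ?_⟩
      congr 1
      ring

-- one-character prefix / infix facts
theorem pvSingleton_prefix_iff (c : Char) (l : List Char) : [c] <+: l ↔ l.head? = some c := by
  cases l <;> simp [List.cons_prefix_cons, eq_comm]

theorem pvSingleton_infix_iff (c : Char) (l : List Char) : [c] <:+: l ↔ c ∈ l := by
  rw [List.infix_iff_prefix_suffix]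
  constructor
  · rintro ⟨t, ht, hsuf⟩
    rw [pvSingleton_prefix_iff] at ht
    exact hsuf.mem (List.mem_of_mem_head? ht)
  · intro hm
    obtain ⟨a, b, rfl⟩ := List.append_of_mem hm
    exact ⟨c :: b, by rw [pvSingleton_prefix_iff]; simp, by simp⟩

theorem pvFind_hit_bounds (line ch : List Char) (start : Nat) (h : start ≤ line.length)
    (hch : ch ≠ []) (hne : PySem.Chars.findFrom line ch (start : Int) ≠ -1) :
    (start : Int) ≤ PySem.Chars.findFrom line ch (start : Int) ∧
      (PySem.Chars.findFrom line ch (start : Int)).toNat < line.length := by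
  obtain ⟨h1, h2, -⟩ := PySem.Chars.findFrom_natCast_spec line ch start h hne
  refine ⟨h1, ?_⟩
  rcases h2 with ⟨t, ht⟩
  cases ch with
  | nil => exact absurd rfl hch
  | cons c cs =>
    have h0 : 0 < (List.drop (PySem.Chars.findFrom line (c :: cs) (start : Int)).toNat line).length := by
      rw [← ht]; simp
    rw [List.length_drop] at h0
    omega

theorem findLoop_eq_pvPos (line : List Char) (c : Char) (fuel start : Nat)
    (hs : start ≤ line.length) (hf : line.length + 1 - start ≤ fuel) :
    findLoop line [c] fuel (PySem.Chars.findFrom line [c] (start : Int))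
      = pvPos c (line.drop start) start := by
  induction fuel generalizing start with
  | zero => omega
  | succ fuel ih =>
    rw [findLoop]
    have hff := PySem.Chars.findFrom_natCast line [c] start hs
    by_cases hj : PySem.Chars.findFrom line [c] (start : Int) = -1
    · rw [if_pos hj]
      have hfind : PySem.Chars.find (line.drop start) [c] = -1 := by
        by_contra hne
        rw [if_neg hne] at hff
        have := PySem.Chars.neg_one_le_find (line.drop start) [c]
        omega
      rw [PySem.Chars.find_eq_neg_one_iff, pvSingleton_infix_iff] at hfind
      exact (pvPos_not_mem c _ _ hfind).symm
    · rw [if_neg hj]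
      have hfind : PySem.Chars.find (line.drop start) [c] ≠ -1 := by
        intro habs
        rw [if_pos habs] at hff
        exact hj hff
      have hf0 : 0 ≤ PySem.Chars.find (line.drop start) [c] := by
        have := PySem.Chars.neg_one_le_find (line.drop start) [c]
        omega
      rw [if_neg hfind] at hff
      set f := PySem.Chars.find (line.drop start) [c] with hfdef
      obtain ⟨hpre, hminp⟩ := PySem.Chars.find_spec hf0
      have hkocc : (line.drop start)[f.toNat]? = some c := by
        rw [← List.head?_drop]
        rw [pvSingleton_prefix_iff] at hpre
        exact hpre
      have hkmin : ∀ i < f.toNat, (line.drop start)[i]? ≠ some c := by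
        intro i hi habs
        exact hminp i hi (by rw [pvSingleton_prefix_iff, List.head?_drop]; exact habs)
      rw [pvPos_first c (line.drop start) (start : Int) f.toNat hkocc hkmin]
      have hb := pvFind_hit_bounds line [c] start hs (by simp) hj
      have hjval : PySem.Chars.findFrom line [c] (start : Int) = start + f := hff
      have htn : (PySem.Chars.findFrom line [c] (start : Int)).toNat = start + f.toNat := by
        omega
      have harg : PySem.Chars.findFrom line [c] (start : Int) + 1
          = (((PySem.Chars.findFrom line [c] (start : Int)).toNat + 1 : Nat) : Int) := by
        omega
      rw [harg, ih ((PySem.Chars.findFrom line [c] (start : Int)).toNat + 1) (by omega) (by omega)]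
      have hdd : line.drop ((PySem.Chars.findFrom line [c] (start : Int)).toNat + 1)
          = (line.drop start).drop (f.toNat + 1) := by
        rw [List.drop_drop, htn, ← Nat.add_assoc]
      rw [hdd]
      congr 1
      · omega
      · congr 1
        push_cast
        omega

theorem findAll_eq_pvPos (line : List Char) (c : Char) :
    findAll line [c] = pvPos c line 0 := by
  unfold findAll
  rw [← PySem.Chars.findFrom_zero]
  have := findLoop_eq_pvPos line c (line.length + 1) 0 (Nat.zero_le _) (by omega)
  simpa using this

theorem inner_foldA (i : Int) (cs : List Char) (s : Int)
    (la : Option (Int × Int)) (sp : List (Int × Int)) :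
    (PySem.List.enumerate cs s).foldl
        (fun st2 jc =>
          if jc.2 = '^' then (st2.1, st2.2 ++ [(i, jc.1)])
          else if jc.2 = 'S' then (some (i, jc.1), st2.2)
          else st2) (la, sp)
      = (((pvPos 'S' cs s).getLast?.map (fun j => (i, j))).or la,
         sp ++ (pvPos '^' cs s).map (fun j => (i, j))) := by
  induction cs generalizing s la sp with
  | nil => simp [PySem.List.enumerate, pvPos_nil]
  | cons x xs ih =>
    rw [PySem.List.enumerate_cons]
    simp only [List.foldl_cons]
    by_cases hc : x = '^'
    · subst hc
      rw [ih]
      rw [pvPos_cons 'S', pvPos_cons '^']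
      simp
    · by_cases hs : x = 'S'
      · subst hs
        rw [if_neg (by decide)]
        simp only [if_true]
        rw [ih]
        rw [pvPos_cons 'S', pvPos_cons '^']
        simp only [if_neg (by decide : ¬('S' = '^')), reduceIte]
        cases hlast : (pvPos 'S' xs (s + 1)).getLast? <;>
          simp [List.getLast?_cons, hlast]
      · rw [if_neg (by simpa using hc), if_neg (by simpa using hs)]
        rw [ih]
        rw [pvPos_cons 'S', pvPos_cons '^']
        simp [hc, hs]

theorem outer_foldA (lines : List (List Char)) (s : Int)
    (la : Option (Int × Int)) (sp : List (Int × Int)) :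
    (PySem.List.enumerate lines s).foldl
        (fun (st : Option (Int × Int) × List (Int × Int)) il =>
          (PySem.List.enumerate il.2 0).foldl
            (fun st2 jc =>
              if jc.2 = '^' then (st2.1, st2.2 ++ [(il.1, jc.1)])
              else if jc.2 = 'S' then (some (il.1, jc.1), st2.2)
              else st2) st) (la, sp)
      = ((((PySem.List.enumerate lines s).flatMap (pvLinePos 'S')).getLast?).or la,
         sp ++ (PySem.List.enumerate lines s).flatMap (pvLinePos '^')) := by
  induction lines generalizing s la sp with
  | nil => simp [PySem.List.enumerate]
  | cons l ls ih =>
    rw [PySem.List.enumerate_cons]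
    simp only [List.foldl_cons, List.flatMap_cons]
    rw [inner_foldA]
    rw [ih]
    rw [List.getLast?_append, Prod.mk.injEq]
    constructor
    · rw [Option.or_assoc]
      congr 1
      simp [pvLinePos, List.getLast?_map]
    · simp [pvLinePos, List.append_assoc]

theorem positionsB_eq_flatMap (lines : List (List Char)) (c : Char) :
    positionsB lines [c] = (PySem.List.enumerate lines 0).flatMap (pvLinePos c) := by
  unfold positionsB
  rw [PySem.List.foldl_append_eq_flatMap]
  rw [List.nil_append]
  rw [List.flatMap_def, List.flatMap_def]
  congr 1
  apply List.map_congr_left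
  intro il _
  rw [findAll_eq_pvPos il.2 c]
  simp [pvLinePos]

theorem pyGet_neg_one_eq_getLast? {α : Type} (xs : List α) :
    PySem.List.pyGet? xs (-1) = xs.getLast? := by
  cases xs with
  | nil => simp [PySem.List.pyGet?, PySem.List.pyIdx?]
  | cons x l =>
    rw [List.getLast?_eq_getElem?]
    simp [PySem.List.pyGet?, PySem.List.pyIdx?]

-- ===== VERDICT (by name: the statement is the Claim_ definition above) =====
theorem parse_spec : Claim_equal_parse := by
  intro text _
  unfold Spec_parse parse parse_alt
  simp only []
  rw [outer_foldA]
  rw [positionsB_eq_flatMap, positionsB_eq_flatMap]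
  rw [pyGet_neg_one_eq_getLast?]
  simp [Option.or_none]
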